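-- pv_equiv track=rewrite | github.com/wronai/redsl | redsl/commands/_indent_fixers.py | _strip_excess_indent
-- ===== SOURCE A (Python) =====
-- def _strip_excess_indent(lines: list[str], i: int, new_lines: list[str], def_indent: int, expected: int, scan: int, changed: bool) -> tuple[list[str], int, bool]:
--     """Strip one extra indent level from over-indented body lines."""
--     while i < len(lines):
--         bl = lines[i]
--         bl_indent = len(bl) - len(bl.lstrip()) if bl.strip() else -1
--         if not bl.strip():
--             new_lines.append(bl)
--             i += 1
--             continue
--         if bl_indent <= def_indent and i > scan:
--             break
--         if bl_indent >= expected + 4: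
--             new_lines.append(bl[4:])
--             changed = True
--         else:
--             new_lines.append(bl)
--         i += 1
--     return new_lines, i, changed
-- ===== SOURCE B (Python) =====
-- def _strip_excess_indent(lines: list[str], i: int, new_lines: list[str], def_indent: int, expected: int, scan: int, changed: bool) -> tuple[list[str], int, bool]:
--     """Two-pass: find the stop index, then transform the slice in one comprehension.
--     Note: returns a fresh list instead of mutating new_lines in place."""
--     n = len(lines)
--     j = i
--     while j < n:
--         bl = lines[j]
--         if bl.strip() and (len(bl) - len(bl.lstrip())) <= def_indent and j > scan:
--             break
--         j += 1
--     seg = [lines[k] for k in range(i, j)]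
--     dedent = lambda bl: bool(bl.strip()) and (len(bl) - len(bl.lstrip())) >= expected + 4
--     out = [bl[4:] if dedent(bl) else bl for bl in seg]
--     return new_lines + out, j, changed or any(dedent(bl) for bl in seg)
-- ===== Notes on version B (the rewrite author's own statement) =====
-- stated objective: alternative
-- what changed: Replaces A's single stateful while-loop (which interleaves appending, dedenting and flag updates) by a two-pass decomposition: a pure scan that finds the stop index j, then one comprehension over lines[i:j] that builds the transformed slice and the changed flag; B also returns a fresh list rather than mutating new_lines in place (return value identical).
import Mathlib
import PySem

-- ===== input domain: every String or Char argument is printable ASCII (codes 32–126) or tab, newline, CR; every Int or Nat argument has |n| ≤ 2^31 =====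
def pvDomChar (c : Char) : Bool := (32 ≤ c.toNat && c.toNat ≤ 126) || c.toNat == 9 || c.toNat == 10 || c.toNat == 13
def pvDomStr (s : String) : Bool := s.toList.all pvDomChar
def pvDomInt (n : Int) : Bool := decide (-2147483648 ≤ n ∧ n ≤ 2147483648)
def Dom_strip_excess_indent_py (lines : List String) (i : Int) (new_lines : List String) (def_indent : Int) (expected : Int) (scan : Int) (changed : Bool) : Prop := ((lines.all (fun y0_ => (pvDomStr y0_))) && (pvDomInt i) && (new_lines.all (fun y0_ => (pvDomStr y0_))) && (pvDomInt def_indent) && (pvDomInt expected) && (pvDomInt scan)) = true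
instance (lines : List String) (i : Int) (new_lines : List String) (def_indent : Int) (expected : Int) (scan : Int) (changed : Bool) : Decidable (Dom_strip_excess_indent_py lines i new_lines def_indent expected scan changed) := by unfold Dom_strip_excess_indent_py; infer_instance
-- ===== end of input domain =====

-- B replaces A's single stateful while-loop by a two-pass decomposition (find the stop
-- index, then transform the slice in one comprehension); B returns a fresh list where A
-- mutates new_lines in place — the equivalence proved here is about the RETURN value.

-- ===== PORT A =====
-- indent of a line: len(bl) - len(bl.lstrip())  (shared notation for both ports)
def pvIndent (bl : String) : Int := PySem.Str.len bl - PySem.Str.len (PySem.Str.lstrip bl)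

def strip_excess_indent_py (lines : List String) (i : Int) (new_lines : List String) (def_indent : Int) (expected : Int) (scan : Int) (changed : Bool) : List String × Int × Bool :=
  if _h : i < (lines.length : Int) then
    match PySem.List.pyGet? lines i with
    | none => (new_lines, i, changed)  -- IndexError (i < -len); excluded by Pre_
    | some bl =>
      let bl_indent : Int := if PySem.Str.strip bl ≠ "" then pvIndent bl else -1
      if PySem.Str.strip bl = "" then
        strip_excess_indent_py lines (i + 1) (new_lines ++ [bl]) def_indent expected scan changed
      else if bl_indent ≤ def_indent ∧ i > scan then
        (new_lines, i, changed)
      else if bl_indent ≥ expected + 4 then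
        strip_excess_indent_py lines (i + 1) (new_lines ++ [PySem.Str.slice bl (some 4) none]) def_indent expected scan true
      else
        strip_excess_indent_py lines (i + 1) (new_lines ++ [bl]) def_indent expected scan changed
  else (new_lines, i, changed)
termination_by ((lines.length : Int) - i).toNat
decreasing_by all_goals omega

-- ===== PORT B =====
def pvBlank (bl : String) : Bool := PySem.Str.strip bl == ""

def pvStopCond (def_indent : Int) (scan : Int) (j : Int) (bl : String) : Bool :=
  !pvBlank bl && decide (pvIndent bl ≤ def_indent) && decide (j > scan)

-- first index j' ≥ j whose line is non-blank, has indent ≤ def_indent and j' > scan; else len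
def pvStop (lines : List String) (def_indent : Int) (scan : Int) (j : Int) : Int :=
  if _h : j < (lines.length : Int) then
    match PySem.List.pyGet? lines j with
    | none => j  -- IndexError point; excluded by Pre_
    | some bl =>
      if pvStopCond def_indent scan j bl then j
      else pvStop lines def_indent scan (j + 1)
  else j
termination_by ((lines.length : Int) - j).toNat
decreasing_by all_goals omega

def pvDedent (expected : Int) (bl : String) : Bool :=
  !pvBlank bl && decide (pvIndent bl ≥ expected + 4)

def strip_excess_indent_py_alt (lines : List String) (i : Int) (new_lines : List String) (def_indent : Int) (expected : Int) (scan : Int) (changed : Bool) : List String × Int × Bool :=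
  let j := pvStop lines def_indent scan i
  let seg := (PySem.List.pyRange i j 1).map (fun k => PySem.List.pyGetD lines k "")
  (new_lines ++ seg.map (fun bl => if pvDedent expected bl then PySem.Str.slice bl (some 4) none else bl),
   j,
   changed || seg.any (pvDedent expected))

-- ===== PRECONDITION & SPEC =====
-- Pre_ excludes exactly the inputs where A raises IndexError: i < -len(lines).
def Pre_strip_excess_indent_py (lines : List String) (i : Int) (new_lines : List String) (def_indent : Int) (expected : Int) (scan : Int) (changed : Bool) : Prop :=
  -(lines.length : Int) ≤ i
instance (lines : List String) (i : Int) (new_lines : List String) (def_indent : Int) (expected : Int) (scan : Int) (changed : Bool) : Decidable (Pre_strip_excess_indent_py lines i new_lines def_indent expected scan changed) := by unfold Pre_strip_excess_indent_py; infer_instance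

def pvWitness_strip_excess_indent_py : List String × Int × List String × Int × Int × Int × Bool :=
  (["def f():", "        x = 1", "    y"], 1, ["p"], 0, 4, 0, false)

def Spec_strip_excess_indent_py (lines : List String) (i : Int) (new_lines : List String) (def_indent : Int) (expected : Int) (scan : Int) (changed : Bool) (out : List String × Int × Bool) : Prop := out = strip_excess_indent_py_alt lines i new_lines def_indent expected scan changed
instance (lines : List String) (i : Int) (new_lines : List String) (def_indent : Int) (expected : Int) (scan : Int) (changed : Bool) (out : List String × Int × Bool) : Decidable (Spec_strip_excess_indent_py lines i new_lines def_indent expected scan changed out) := by unfold Spec_strip_excess_indent_py; infer_instance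

-- ===== CLAIM (what is proved, stated in full; the proofs are below) =====
def Claim_equal_strip_excess_indent_py : Prop := ∀ (lines : List String) (i : Int) (new_lines : List String) (def_indent : Int) (expected : Int) (scan : Int) (changed : Bool), Dom_strip_excess_indent_py lines i new_lines def_indent expected scan changed → Pre_strip_excess_indent_py lines i new_lines def_indent expected scan changed → Spec_strip_excess_indent_py lines i new_lines def_indent expected scan changed (strip_excess_indent_py lines i new_lines def_indent expected scan changed)

-- ===== LEMMAS AND PROOFS =====

theorem pvStop_ge_fuel (lines : List String) (d s : Int) :
    ∀ (n : Nat) (j : Int), ((lines.length : Int) - j).toNat ≤ n → j ≤ pvStop lines d s j := by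
  intro n
  induction n with
  | zero =>
      intro j hn
      rw [pvStop]
      have h : ¬ j < (lines.length : Int) := by omega
      simp [h]
  | succ n ih =>
      intro j hn
      rw [pvStop]
      by_cases h : j < (lines.length : Int)
      · simp only [h, dif_pos]
        cases hget : PySem.List.pyGet? lines j with
        | none => simp
        | some bl =>
            by_cases hc : pvStopCond d s j bl
            · simp [hc]
            · simp only [hc, Bool.false_eq_true, if_false]
              have := ih (j + 1) (by omega)
              omega
      · simp [h]

theorem pvStop_ge (lines : List String) (d s : Int) (j : Int) : j ≤ pvStop lines d s j :=
  pvStop_ge_fuel lines d s ((lines.length : Int) - j).toNat j le_rfl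

theorem pvStop_stopped (lines : List String) (d s : Int) (j : Int)
    (h : j < (lines.length : Int)) (bl : String)
    (hget : PySem.List.pyGet? lines j = some bl)
    (hc : pvStopCond d s j bl = true) :
    pvStop lines d s j = j := by
  rw [pvStop]; simp [h, hget, hc]

theorem pvStop_step (lines : List String) (d s : Int) (j : Int)
    (h : j < (lines.length : Int)) (bl : String)
    (hget : PySem.List.pyGet? lines j = some bl)
    (hc : pvStopCond d s j bl = false) :
    pvStop lines d s j = pvStop lines d s (j + 1) := by
  rw [pvStop]; simp [h, hget, hc]

-- one step of B: consuming line i (not a stop line) shifts the start to i+1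
theorem alt_step (lines : List String) (i : Int) (nl : List String) (d e s : Int) (c : Bool)
    (h : i < (lines.length : Int)) (bl : String)
    (hget : PySem.List.pyGet? lines i = some bl)
    (hc : pvStopCond d s i bl = false) :
    strip_excess_indent_py_alt lines i nl d e s c =
      strip_excess_indent_py_alt lines (i + 1)
        (nl ++ [if pvDedent e bl then PySem.Str.slice bl (some 4) none else bl]) d e s
        (c || pvDedent e bl) := by
  dsimp only [strip_excess_indent_py_alt]
  rw [pvStop_step lines d s i h bl hget hc]
  have hj : i + 1 ≤ pvStop lines d s (i + 1) := pvStop_ge lines d s (i + 1)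
  rw [PySem.List.pyRange_one_cons (by omega)]
  simp [PySem.List.pyGetD, hget, List.append_assoc, Bool.or_assoc]

theorem alt_stop (lines : List String) (i : Int) (nl : List String) (d e s : Int) (c : Bool)
    (h : i < (lines.length : Int)) (bl : String)
    (hget : PySem.List.pyGet? lines i = some bl)
    (hc : pvStopCond d s i bl = true) :
    strip_excess_indent_py_alt lines i nl d e s c = (nl, i, c) := by
  dsimp only [strip_excess_indent_py_alt]
  rw [pvStop_stopped lines d s i h bl hget hc, PySem.List.pyRange_one_eq_nil (le_refl i)]
  simp

theorem alt_end (lines : List String) (i : Int) (nl : List String) (d e s : Int) (c : Bool)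
    (h : ¬ i < (lines.length : Int)) :
    strip_excess_indent_py_alt lines i nl d e s c = (nl, i, c) := by
  dsimp only [strip_excess_indent_py_alt]
  rw [pvStop]
  simp only [h, dite_false]
  rw [PySem.List.pyRange_one_eq_nil (le_refl i)]
  simp

theorem key_fuel (lines : List String) (d e s : Int) :
    ∀ (n : Nat) (i : Int) (nl : List String) (c : Bool),
      ((lines.length : Int) - i).toNat ≤ n → -(lines.length : Int) ≤ i →
      strip_excess_indent_py lines i nl d e s c = strip_excess_indent_py_alt lines i nl d e s c := by
  intro n
  induction n with
  | zero =>
      intro i nl c hn hpre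
      have h : ¬ i < (lines.length : Int) := by omega
      rw [strip_excess_indent_py]
      simp only [h, dite_false]
      rw [alt_end lines i nl d e s c h]
  | succ n ih =>
      intro i nl c hn hpre
      by_cases h : i < (lines.length : Int)
      · obtain ⟨bl, hget⟩ : ∃ bl, PySem.List.pyGet? lines i = some bl := by
          cases hg : PySem.List.pyGet? lines i with
          | none =>
              exfalso
              have := (PySem.List.pyGet?_eq_none_iff (xs := lines) (i := i)).mp hg
              exact this (by unfold PySem.Raise.InRange; omega)
          | some b => exact ⟨b, rfl⟩
        rw [strip_excess_indent_py]
        simp only [h, dif_pos, hget]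
        by_cases hb : PySem.Str.strip bl = ""
        · -- blank line: appended unchanged, never a stop, never a dedent
          simp only [hb, ne_eq, not_true_eq_false, if_true, if_false, ite_true]
          have hc : pvStopCond d s i bl = false := by simp [pvStopCond, pvBlank, hb]
          have hded : pvDedent e bl = false := by simp [pvDedent, pvBlank, hb]
          rw [ih (i + 1) (nl ++ [bl]) c (by omega) (by omega),
              alt_step lines i nl d e s c h bl hget hc, hded]
          simp
        · simp only [hb, ne_eq, not_false_eq_true, if_true, if_false, ite_false]
          by_cases hstop : pvIndent bl ≤ d ∧ i > s
          · rw [if_pos hstop]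
            exact (alt_stop lines i nl d e s c h bl hget
              (by simp [pvStopCond, pvBlank, hb, hstop.1, hstop.2])).symm
          · rw [if_neg hstop]
            have hc : pvStopCond d s i bl = false := by
              rcases not_and_or.mp hstop with h1 | h2
              · simp [pvStopCond, h1]
              · simp [pvStopCond, h2]
            by_cases hd4 : pvIndent bl ≥ e + 4
            · rw [if_pos hd4,
                  ih (i + 1) (nl ++ [PySem.Str.slice bl (some 4) none]) true (by omega) (by omega),
                  alt_step lines i nl d e s c h bl hget hc]
              have hded : pvDedent e bl = true := by simp [pvDedent, pvBlank, hb, hd4]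
              rw [hded]
              simp
            · rw [if_neg hd4,
                  ih (i + 1) (nl ++ [bl]) c (by omega) (by omega),
                  alt_step lines i nl d e s c h bl hget hc]
              have hded : pvDedent e bl = false := by simp [pvDedent, hd4]
              rw [hded]
              simp
      · rw [strip_excess_indent_py]
        simp only [h, dite_false]
        rw [alt_end lines i nl d e s c h]

-- ===== VERDICT (by name: the statement is the Claim_ definition above) =====
theorem strip_excess_indent_py_spec : Claim_equal_strip_excess_indent_py := by
  intro lines i nl d e s c _hdom hpre
  unfold Spec_strip_excess_indent_py
  exact key_fuel lines d e s ((lines.length : Int) - i).toNat i nl c le_rfl hpre
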